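-- pv_equiv track=rewrite | github.com/mighty-muffin/insecure-banking | update_imports_v2.py | convert_multi_service_import
-- ===== SOURCE A (Python) =====
-- def convert_multi_service_import(imports_str):
--     """Convert multi-service imports."""
--     # Handle parenthesized imports
--     if '(' in imports_str:
--         return f"from web.services import {imports_str}"  # Skip complex multi-line imports
--
--     imports = [i.strip() for i in imports_str.split(',')]
--     result = []
--
--     accounts_services = [i for i in imports if i in ['AccountService']]
--     banking_services = [i for i in imports if i in ['CashAccountService', 'CreditAccountService', 'ActivityService', 'StorageService']]
--     transfer_services = [i for i in imports if i in ['TransferService']]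
--
--     if accounts_services:
--         result.append(f"from apps.accounts.services import {', '.join(accounts_services)}")
--     if banking_services:
--         result.append(f"from apps.banking.services import {', '.join(banking_services)}")
--     if transfer_services:
--         result.append(f"from apps.transfers.services import {', '.join(transfer_services)}")
--
--     return '\n'.join(result) if result else f"from web.services import {imports_str}"
-- ===== SOURCE B (Python) =====
-- SERVICE_GROUP = {
--     'AccountService': 0,
--     'CashAccountService': 1,
--     'CreditAccountService': 1,
--     'ActivityService': 1,
--     'StorageService': 1,
--     'TransferService': 2,
-- }
-- MODULES = ['apps.accounts.services', 'apps.banking.services', 'apps.transfers.services']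
--
--
-- def convert_multi_service_import(imports_str):
--     """Convert multi-service imports."""
--     if '(' in imports_str:
--         return f"from web.services import {imports_str}"
--
--     groups = [[], [], []]
--     for part in imports_str.split(','):
--         name = part.strip()
--         g = SERVICE_GROUP.get(name)
--         if g is not None:
--             groups[g].append(name)
--
--     lines = [f"from {module} import {', '.join(names)}"
--              for module, names in zip(MODULES, groups) if names]
--     return '\n'.join(lines) if lines else f"from web.services import {imports_str}"
-- ===== Notes on version B (the rewrite author's own statement) =====
-- stated objective: simpler
-- what changed: Replaced A's three separate membership-filter passes over the split imports with a single name-to-group dict lookup pass that appends each known name to its group's accumulator, then emits the lines from a fixed module list.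
import Mathlib
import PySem

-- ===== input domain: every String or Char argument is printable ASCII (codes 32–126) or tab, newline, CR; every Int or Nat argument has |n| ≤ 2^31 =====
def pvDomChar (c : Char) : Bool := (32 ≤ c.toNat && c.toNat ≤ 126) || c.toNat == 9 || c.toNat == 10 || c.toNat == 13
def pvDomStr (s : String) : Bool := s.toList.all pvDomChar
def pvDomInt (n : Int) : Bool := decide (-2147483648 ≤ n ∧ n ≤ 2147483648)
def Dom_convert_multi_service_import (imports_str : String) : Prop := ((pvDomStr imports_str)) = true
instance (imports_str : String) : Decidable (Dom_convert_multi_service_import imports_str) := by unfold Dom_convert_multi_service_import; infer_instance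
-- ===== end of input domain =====

-- B replaces A's three membership-filter passes by a name→group dict and ONE pass that
-- appends each known name to its group's accumulator (objective: simpler decomposition).

-- ===== PORT A =====
def convert_multi_service_import (imports_str : String) : String :=
  if PySem.Str.isIn "(" imports_str then
    "from web.services import " ++ imports_str
  else
    let imports := ((PySem.Str.split? imports_str ",").getD []).map PySem.Str.strip
    let accounts_services := imports.filter (fun i => ["AccountService"].contains i)
    let banking_services := imports.filter (fun i =>
      ["CashAccountService", "CreditAccountService", "ActivityService", "StorageService"].contains i)
    let transfer_services := imports.filter (fun i => ["TransferService"].contains i)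
    let result : List String := []
    let result := if accounts_services.isEmpty then result else
      result ++ ["from apps.accounts.services import " ++ PySem.Str.join ", " accounts_services]
    let result := if banking_services.isEmpty then result else
      result ++ ["from apps.banking.services import " ++ PySem.Str.join ", " banking_services]
    let result := if transfer_services.isEmpty then result else
      result ++ ["from apps.transfers.services import " ++ PySem.Str.join ", " transfer_services]
    if result.isEmpty then "from web.services import " ++ imports_str
    else PySem.Str.join "\n" result

-- ===== PORT B =====
def pvSvcGroup : PySem.Dict String Int := PySem.Dict.mk
  [("AccountService", 0), ("CashAccountService", 1), ("CreditAccountService", 1),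
   ("ActivityService", 1), ("StorageService", 1), ("TransferService", 2)]

def pvModules : List String :=
  ["apps.accounts.services", "apps.banking.services", "apps.transfers.services"]

def pvAltStep (st : List String × List String × List String) (part : String) :
    List String × List String × List String :=
  let name := PySem.Str.strip part
  match PySem.Dict.get? pvSvcGroup name with
  | some 0 => (st.1 ++ [name], st.2.1, st.2.2)
  | some 1 => (st.1, st.2.1 ++ [name], st.2.2)
  | some 2 => (st.1, st.2.1, st.2.2 ++ [name])
  | _ => st

def convert_multi_service_import_alt (imports_str : String) : String :=
  if PySem.Str.isIn "(" imports_str then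
    "from web.services import " ++ imports_str
  else
    let groups := ((PySem.Str.split? imports_str ",").getD []).foldl pvAltStep ([], [], [])
    let lines := ((pvModules.zip [groups.1, groups.2.1, groups.2.2]).filter
        (fun p => !p.2.isEmpty)).map
      (fun p => "from " ++ p.1 ++ " import " ++ PySem.Str.join ", " p.2)
    if lines.isEmpty then "from web.services import " ++ imports_str
    else PySem.Str.join "\n" lines

-- ===== PRECONDITION & SPEC =====
def Spec_convert_multi_service_import (imports_str : String) (out : String) : Prop := out = convert_multi_service_import_alt imports_str
instance (imports_str : String) (out : String) : Decidable (Spec_convert_multi_service_import imports_str out) := by unfold Spec_convert_multi_service_import; infer_instance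

-- ===== CLAIM (what is proved, stated in full; the proofs are below) =====
def Claim_equal_convert_multi_service_import : Prop := ∀ (imports_str : String), Dom_convert_multi_service_import imports_str → Spec_convert_multi_service_import imports_str (convert_multi_service_import imports_str)

-- ===== LEMMAS AND PROOFS =====

-- one fold step = one step of each of A's three filters
theorem pvAltStep_eq (st : List String × List String × List String) (part : String) :
    pvAltStep st part =
      (st.1 ++ ([PySem.Str.strip part].filter (fun i => ["AccountService"].contains i)),
       st.2.1 ++ ([PySem.Str.strip part].filter (fun i =>
         ["CashAccountService", "CreditAccountService", "ActivityService", "StorageService"].contains i)),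
       st.2.2 ++ ([PySem.Str.strip part].filter (fun i => ["TransferService"].contains i))) := by
  unfold pvAltStep
  simp only [pvSvcGroup, PySem.Dict.get?_mk_cons]
  split_ifs with h1 h2 h3 h4 h5 h6
  · rw [← eq_of_beq h1]; simp [List.filter]
  · rw [← eq_of_beq h2]; simp [List.filter]
  · rw [← eq_of_beq h3]; simp [List.filter]
  · rw [← eq_of_beq h4]; simp [List.filter]
  · rw [← eq_of_beq h5]; simp [List.filter]
  · rw [← eq_of_beq h6]; simp [List.filter]
  · simp only [beq_iff_eq] at h1 h2 h3 h4 h5 h6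
    simp [List.filter, PySem.Dict.get?, List.find?,
      Ne.symm h1, Ne.symm h2, Ne.symm h3, Ne.symm h4, Ne.symm h5, Ne.symm h6]

-- the fold computes A's three filters (with a generalized accumulator)
theorem pvFold_eq (parts : List String) (a b c : List String) :
    parts.foldl pvAltStep (a, b, c) =
      (a ++ (parts.map PySem.Str.strip).filter (fun i => ["AccountService"].contains i),
       b ++ (parts.map PySem.Str.strip).filter (fun i =>
         ["CashAccountService", "CreditAccountService", "ActivityService", "StorageService"].contains i),
       c ++ (parts.map PySem.Str.strip).filter (fun i => ["TransferService"].contains i)) := by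
  induction parts generalizing a b c with
  | nil => simp
  | cons p ps ih =>
    simp only [List.foldl_cons, pvAltStep_eq, ih, List.map_cons, List.filter_cons]
    split_ifs <;> simp

-- ===== VERDICT (by name: the statement is the Claim_ definition above) =====
theorem convert_multi_service_import_spec : Claim_equal_convert_multi_service_import := by
  intro s _
  unfold Spec_convert_multi_service_import convert_multi_service_import convert_multi_service_import_alt
  by_cases hp : PySem.Str.isIn "(" s = true
  · rw [if_pos hp, if_pos hp]
  · rw [if_neg hp, if_neg hp]
    simp only [pvFold_eq, List.nil_append]
    set parts := ((PySem.Str.split? s ",").getD []).map PySem.Str.strip with hparts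
    set fa := parts.filter (fun i => ["AccountService"].contains i) with hfa
    set fb := parts.filter (fun i =>
      ["CashAccountService", "CreditAccountService", "ActivityService", "StorageService"].contains i) with hfb
    set fc := parts.filter (fun i => ["TransferService"].contains i) with hfc
    by_cases ha : fa.isEmpty <;> by_cases hb : fb.isEmpty <;> by_cases hc : fc.isEmpty <;>
      simp [ha, hb, hc, pvModules, List.zip]
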